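-- pv_equiv track=rewrite | github.com/kamyu104/LeetCode-Solutions | Python/widest-pair-of-indices-with-equal-range-sum.py | widestPairOfIndices
-- ===== SOURCE A (Python) =====
-- import itertools
--
-- def widestPairOfIndices(nums1, nums2):
--     """
--     :type nums1: List[int]
--     :type nums2: List[int]
--     :rtype: int
--     """
--     lookup = {0:-1}
--     result = total = 0
--     for i, (n1, n2) in enumerate(itertools.izip(nums1, nums2)):
--         total += n1-n2
--         if total not in lookup:
--             lookup[total] = i
--         result = max(result, i-lookup[total])
--     return result
-- ===== SOURCE B (Python) =====
-- def widestPairOfIndices(nums1, nums2):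
--     # brute force: materialize the prefix-difference array, then scan all
--     # index pairs for equal entries, keeping the widest gap; the inner scan
--     # stops once the remaining gap cannot beat the best so far
--     ps = [0]
--     for a, b in zip(nums1, nums2):
--         ps.append(ps[-1] + (a - b))
--     result = 0
--     for k, v in enumerate(ps):
--         for j, u in enumerate(ps):
--             if k - j <= result:
--                 break
--             if u == v:
--                 result = k - j
--     return result
-- ===== Notes on version B (the rewrite author's own statement) =====
-- stated objective: alternative
-- what changed: A does one fused pass with a hash of first occurrences of the running difference; B materializes the prefix-difference array and brute-force scans all index pairs for equal entries (pruning the inner scan once the remaining gap cannot beat the best), with no dict and no running total in the scan.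
import Mathlib
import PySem

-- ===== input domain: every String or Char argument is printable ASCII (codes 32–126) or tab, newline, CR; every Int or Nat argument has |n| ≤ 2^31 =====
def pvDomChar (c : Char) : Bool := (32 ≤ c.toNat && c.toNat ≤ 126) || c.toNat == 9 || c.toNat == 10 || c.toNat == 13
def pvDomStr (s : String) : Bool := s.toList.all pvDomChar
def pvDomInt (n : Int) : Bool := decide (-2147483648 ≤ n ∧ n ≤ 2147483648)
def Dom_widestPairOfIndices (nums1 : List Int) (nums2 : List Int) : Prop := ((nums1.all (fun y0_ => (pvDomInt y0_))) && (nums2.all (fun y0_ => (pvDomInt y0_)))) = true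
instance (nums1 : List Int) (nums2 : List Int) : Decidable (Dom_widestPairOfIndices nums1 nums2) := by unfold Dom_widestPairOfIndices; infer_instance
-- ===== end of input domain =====

-- B drops A's hash of first occurrences: it materializes the prefix-difference
-- array and brute-force scans all index pairs for equal entries (objective:
-- alternative algorithm; not faster).

-- ===== PORT A =====
-- A's loop state: lookup (difference -> first index), result, total.
-- lookup[total] is always present when read, so getD 0 is exact.
def pvALoop : List (Int × Int) → Int → PySem.Dict Int Int → Int → Int → Int
  | [], _, _, result, _ => result
  | (n1, n2) :: rest, i, lookup, result, total =>
    let total' := total + (n1 - n2)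
    let lookup' := if lookup.contains total' then lookup else lookup.insert total' i
    let result' := max result (i - lookup'.getD total' 0)
    pvALoop rest (i + 1) lookup' result' total'

def widestPairOfIndices (nums1 : List Int) (nums2 : List Int) : Int :=
  pvALoop (List.zip nums1 nums2) 0 (PySem.Dict.ofList [((0 : Int), (-1 : Int))]) 0 0

-- ===== PORT B =====
-- the inner loop over enumerate(ps), with its break, as structural recursion
def pvBInner : List (Int × Int) → Int × Int → Int → Int
  | [], _, result => result
  | ju :: rest, kv, result =>
    if kv.1 - ju.1 ≤ result then result
    else if ju.2 = kv.2 then pvBInner rest kv (kv.1 - ju.1)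
    else pvBInner rest kv result

-- ps built by appending ps[-1] + (a - b); ps is never empty, so getD 0 is exact
def widestPairOfIndices_alt (nums1 : List Int) (nums2 : List Int) : Int :=
  let ps : List Int := (List.zip nums1 nums2).foldl
    (fun acc p => acc ++ [(PySem.List.pyGet? acc (-1)).getD 0 + (p.1 - p.2)]) [0]
  (PySem.List.enumerate ps 0).foldl (fun result kv =>
    pvBInner (PySem.List.enumerate ps 0) kv result) 0

-- ===== PRECONDITION & SPEC =====
def Spec_widestPairOfIndices (nums1 : List Int) (nums2 : List Int) (out : Int) : Prop := out = widestPairOfIndices_alt nums1 nums2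
instance (nums1 : List Int) (nums2 : List Int) (out : Int) : Decidable (Spec_widestPairOfIndices nums1 nums2 out) := by unfold Spec_widestPairOfIndices; infer_instance

-- ===== CLAIM (what is proved, stated in full; the proofs are below) =====
def Claim_equal_widestPairOfIndices : Prop := ∀ (nums1 : List Int) (nums2 : List Int), Dom_widestPairOfIndices nums1 nums2 → Spec_widestPairOfIndices nums1 nums2 (widestPairOfIndices nums1 nums2)

-- ===== LEMMAS AND PROOFS =====

-- the prefix-difference values contributed by the remaining zipped pairs
def pvExt (total : Int) : List (Int × Int) → List Int
  | [] => []
  | (a, b) :: rest => (total + (a - b)) :: pvExt (total + (a - b)) rest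

-- characterization of the answer on the prefix-difference array ps:
-- the max of 0 and all widths k - j of pairs of equal entries
def pvGood (ps : List Int) (R : Int) : Prop :=
  0 ≤ R ∧
  (∀ (j k : Nat) (hj : j < ps.length) (hk : k < ps.length),
      ps[j] = ps[k] → (k : Int) - (j : Int) ≤ R) ∧
  (R = 0 ∨ ∃ (j k : Nat) (hj : j < ps.length) (hk : k < ps.length),
      ps[j] = ps[k] ∧ (k : Int) - (j : Int) = R)

lemma pvGood_unique {ps : List Int} {R1 R2 : Int}
    (h1 : pvGood ps R1) (h2 : pvGood ps R2) : R1 = R2 := by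
  obtain ⟨h10, h1u, h1a⟩ := h1
  obtain ⟨h20, h2u, h2a⟩ := h2
  have le12 : R1 ≤ R2 := by
    rcases h1a with h | ⟨j, k, hj, hk, he, hw⟩
    · omega
    · have := h2u j k hj hk he; omega
  have le21 : R2 ≤ R1 := by
    rcases h2a with h | ⟨j, k, hj, hk, he, hw⟩
    · omega
    · have := h1u j k hj hk he; omega
  omega

-- first-occurrence index (what A's dict stores, plus one)
def pvFirst (v : Int) : List Int → Nat
  | [] => 0
  | x :: r => if x = v then 0 else pvFirst v r + 1

lemma pvFirst_lt_length {v : Int} {l : List Int} (h : v ∈ l) : pvFirst v l < l.length := by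
  induction l with
  | nil => simp at h
  | cons x r ih =>
    by_cases hx : x = v
    · simp [pvFirst, hx]
    · have hm : v ∈ r := by
        rcases List.mem_cons.mp h with h' | h'
        · exact absurd h'.symm hx
        · exact h'
      simp only [pvFirst, if_neg hx, List.length_cons]
      exact Nat.succ_lt_succ (ih hm)

lemma pvFirst_getElem {v : Int} {l : List Int} (h : v ∈ l) :
    l[pvFirst v l]'(pvFirst_lt_length h) = v := by
  induction l with
  | nil => simp at h
  | cons x r ih =>
    by_cases hx : x = v
    · simp [pvFirst, hx]
    · have hm : v ∈ r := by
        rcases List.mem_cons.mp h with h' | h'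
        · exact absurd h'.symm hx
        · exact h'
      simp only [pvFirst, if_neg hx, List.getElem_cons_succ]
      exact ih hm

lemma pvFirst_le {v : Int} {l : List Int} {j : Nat} (hj : j < l.length) (h : l[j] = v) :
    pvFirst v l ≤ j := by
  induction l generalizing j with
  | nil => simp at hj
  | cons x r ih =>
    cases j with
    | zero =>
      simp only [List.getElem_cons_zero] at h
      simp [pvFirst, h]
    | succ j =>
      simp only [List.getElem_cons_succ] at h
      by_cases hx : x = v
      · simp [pvFirst, hx]
      · simp only [pvFirst, if_neg hx]
        have := ih (by simpa using hj) h
        omega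

lemma pvFirst_append_of_mem {v : Int} {l t : List Int} (h : v ∈ l) :
    pvFirst v (l ++ t) = pvFirst v l := by
  induction l with
  | nil => simp at h
  | cons x r ih =>
    by_cases hx : x = v
    · simp [pvFirst, hx]
    · have hm : v ∈ r := by
        rcases List.mem_cons.mp h with h' | h'
        · exact absurd h'.symm hx
        · exact h'
      simp [pvFirst, hx, ih hm]

lemma pvFirst_concat_self_of_not_mem {v : Int} {l : List Int} (h : v ∉ l) :
    pvFirst v (l ++ [v]) = l.length := by
  induction l with
  | nil => simp [pvFirst]
  | cons x r ih =>
    have hx : x ≠ v := fun e => h (by simp [e])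
    have hm : v ∉ r := fun hm => h (List.mem_cons_of_mem _ hm)
    simp [pvFirst, hx, ih hm]

-- ---- the A side: the fused hash scan satisfies the characterization ----

lemma pvA_good (zs : List (Int × Int)) (seen : List Int) (lookup : PySem.Dict Int Int)
    (result total : Int)
    (hne : seen ≠ [])
    (hlk : ∀ v : Int, lookup.get? v =
        if v ∈ seen then some ((pvFirst v seen : Int) - 1) else none)
    (hr0 : 0 ≤ result)
    (hub : ∀ (j k : Nat) (hj : j < seen.length) (hk : k < seen.length),
        seen[j] = seen[k] → (k : Int) - (j : Int) ≤ result)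
    (hach : result = 0 ∨ ∃ (j k : Nat) (hj : j < seen.length) (hk : k < seen.length),
        seen[j] = seen[k] ∧ (k : Int) - (j : Int) = result) :
    pvGood (seen ++ pvExt total zs)
      (pvALoop zs ((seen.length : Int) - 1) lookup result total) := by
  induction zs generalizing seen lookup result total with
  | nil =>
    simp only [pvExt, List.append_nil, pvALoop]
    exact ⟨hr0, hub, hach⟩
  | cons hd rest ih =>
    obtain ⟨a, b⟩ := hd
    have hps : seen ++ pvExt total ((a, b) :: rest)
        = (seen ++ [total + (a - b)]) ++ pvExt (total + (a - b)) rest := by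
      simp only [pvExt]
      rw [List.append_cons]
    rw [hps]
    simp only [pvALoop]
    have hcon : lookup.contains (total + (a - b)) = decide ((total + (a - b)) ∈ seen) := by
      rw [PySem.Dict.contains_eq_isSome_get?, hlk]
      by_cases hmem : (total + (a - b)) ∈ seen <;> simp [hmem]
    have hidx : (seen.length : Int) - 1 + 1 = (((seen ++ [total + (a - b)]).length : Int) - 1) := by
      simp only [List.length_append, List.length_cons, List.length_nil]
      push_cast
      ring
    have hlen' : (seen ++ [total + (a - b)]).length = seen.length + 1 := by simp
    by_cases hmem : (total + (a - b)) ∈ seen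
    · -- seen difference: first occurrence already recorded
      rw [if_pos (show lookup.contains (total + (a - b)) = true by rw [hcon]; simp [hmem])]
      have hgd : lookup.getD (total + (a - b)) 0
          = (pvFirst (total + (a - b)) seen : Int) - 1 := by
        rw [PySem.Dict.getD_eq_get?_getD, hlk, if_pos hmem]
        rfl
      rw [hgd, hidx]
      have hfl : pvFirst (total + (a - b)) seen < seen.length := pvFirst_lt_length hmem
      have hcat : (seen ++ [total + (a - b)])[seen.length]'(by simp) = total + (a - b) :=
        List.getElem_concat_length rfl _
      apply ih
      · simp
      · intro v
        by_cases hv : v ∈ seen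
        · rw [hlk v, if_pos hv, if_pos (List.mem_append_left _ hv), pvFirst_append_of_mem hv]
        · have hvne : v ≠ total + (a - b) := fun e => hv (e ▸ hmem)
          have hv' : v ∉ seen ++ [total + (a - b)] := by simp [hv, hvne]
          rw [hlk v, if_neg hv, if_neg hv']
      · exact le_trans hr0 (le_max_left _ _)
      · intro j k hj hk he
        rw [hlen'] at hj hk
        rcases Nat.lt_or_ge k seen.length with hk' | hk'
        · rcases Nat.lt_or_ge j seen.length with hj' | hj'
          · rw [List.getElem_append_left hj', List.getElem_append_left hk'] at he
            have := hub j k hj' hk' he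
            have := le_max_left result ((seen.length : Int) - 1 - ((pvFirst (total + (a - b)) seen : Int) - 1))
            omega
          · have h0 : (0:Int) ≤ max result ((seen.length : Int) - 1 - ((pvFirst (total + (a - b)) seen : Int) - 1)) :=
              le_trans hr0 (le_max_left _ _)
            omega
        · have hkeq : k = seen.length := by omega
          subst hkeq
          rcases Nat.lt_or_ge j seen.length with hj' | hj'
          · rw [List.getElem_append_left hj', hcat] at he
            have hle : pvFirst (total + (a - b)) seen ≤ j := pvFirst_le hj' he
            have := le_max_right result ((seen.length : Int) - 1 - ((pvFirst (total + (a - b)) seen : Int) - 1))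
            push_cast at this ⊢
            omega
          · have h0 : (0:Int) ≤ max result ((seen.length : Int) - 1 - ((pvFirst (total + (a - b)) seen : Int) - 1)) :=
              le_trans hr0 (le_max_left _ _)
            omega
      · rcases max_choice result ((seen.length : Int) - 1 - ((pvFirst (total + (a - b)) seen : Int) - 1)) with hmx | hmx
        · rw [hmx]
          rcases hach with h0 | ⟨j, k, hj, hk, he, hw⟩
          · exact Or.inl h0
          · refine Or.inr ⟨j, k, by omega, by omega, ?_, hw⟩
            rw [List.getElem_append_left hj, List.getElem_append_left hk]
            exact he
        · rw [hmx]
          refine Or.inr ⟨pvFirst (total + (a - b)) seen, seen.length, by omega, by omega, ?_, ?_⟩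
          · rw [List.getElem_append_left hfl, hcat]
            exact pvFirst_getElem hmem
          · ring
    · -- new difference: record its (first) index
      rw [if_neg (show ¬ lookup.contains (total + (a - b)) = true by rw [hcon]; simp [hmem])]
      rw [PySem.Dict.getD_insert_self]
      have hcat : (seen ++ [total + (a - b)])[seen.length]'(by simp) = total + (a - b) :=
        List.getElem_concat_length rfl _
      have hmx : max result ((seen.length : Int) - 1 - ((seen.length : Int) - 1)) = result := by
        have : (seen.length : Int) - 1 - ((seen.length : Int) - 1) = 0 := by ring
        rw [this]
        exact max_eq_left hr0
      rw [hmx, hidx]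
      apply ih
      · simp
      · intro v
        by_cases hv : v = total + (a - b)
        · subst hv
          rw [PySem.Dict.get?_insert_self,
            if_pos (List.mem_append_right _ (List.mem_singleton.mpr rfl)),
            pvFirst_concat_self_of_not_mem hmem]
        · rw [PySem.Dict.get?_insert_of_ne lookup _ hv, hlk v]
          by_cases hv' : v ∈ seen
          · rw [if_pos hv', if_pos (List.mem_append_left _ hv'), pvFirst_append_of_mem hv']
          · have : v ∉ seen ++ [total + (a - b)] := by simp [hv, hv']
            rw [if_neg hv', if_neg this]
      · exact hr0
      · intro j k hj hk he
        rw [hlen'] at hj hk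
        rcases Nat.lt_or_ge k seen.length with hk' | hk'
        · rcases Nat.lt_or_ge j seen.length with hj' | hj'
          · rw [List.getElem_append_left hj', List.getElem_append_left hk'] at he
            exact hub j k hj' hk' he
          · omega
        · have hkeq : k = seen.length := by omega
          subst hkeq
          rcases Nat.lt_or_ge j seen.length with hj' | hj'
          · rw [List.getElem_append_left hj', hcat] at he
            exact absurd (he ▸ List.getElem_mem hj') hmem
          · omega
      · rcases hach with h0 | ⟨j, k, hj, hk, he, hw⟩
        · exact Or.inl h0
        · refine Or.inr ⟨j, k, by omega, by omega, ?_, hw⟩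
          rw [List.getElem_append_left hj, List.getElem_append_left hk]
          exact he

-- ---- the B side ----

lemma pvPsBuild (zs : List (Int × Int)) (s0 : List Int) (total : Int)
    (h : PySem.List.pyGet? s0 (-1) = some total) :
    zs.foldl (fun acc p => acc ++ [(PySem.List.pyGet? acc (-1)).getD 0 + (p.1 - p.2)]) s0
      = s0 ++ pvExt total zs := by
  induction zs generalizing s0 total with
  | nil => simp [pvExt]
  | cons hd rest ih =>
    obtain ⟨a, b⟩ := hd
    simp only [List.foldl_cons, h, Option.getD_some]
    rw [ih (s0 ++ [total + (a - b)]) (total + (a - b))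
      (by rw [PySem.List.pyGet?_neg_one]; simp)]
    simp [pvExt]

def pvInnerLoop (E : List (Int × Int)) (k v r : Int) : Int :=
  E.foldl (fun result ju => if ju.2 = v ∧ k - ju.1 > result then k - ju.1 else result) r

def pvOuterLoop (E L : List (Int × Int)) (r : Int) : Int :=
  L.foldl (fun result kv => pvInnerLoop E kv.1 kv.2 result) r

lemma pvInner_spec (E : List (Int × Int)) (k v r : Int) :
    r ≤ pvInnerLoop E k v r ∧
    (∀ ju ∈ E, ju.2 = v → k - ju.1 ≤ pvInnerLoop E k v r) ∧
    (pvInnerLoop E k v r = r ∨ ∃ ju ∈ E, ju.2 = v ∧ pvInnerLoop E k v r = k - ju.1) := by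
  induction E generalizing r with
  | nil => simp [pvInnerLoop]
  | cons ju E ih =>
    have hstep : pvInnerLoop (ju :: E) k v r
        = pvInnerLoop E k v (if ju.2 = v ∧ k - ju.1 > r then k - ju.1 else r) := rfl
    by_cases hc : ju.2 = v ∧ k - ju.1 > r
    · obtain ⟨ih1, ih2, ih3⟩ := ih (k - ju.1)
      rw [hstep, if_pos hc]
      refine ⟨by omega, ?_, ?_⟩
      · intro ju' hm he
        rcases List.mem_cons.mp hm with rfl | hm'
        · exact ih1
        · exact ih2 ju' hm' he
      · rcases ih3 with h | ⟨ju', hm', he', hv'⟩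
        · exact Or.inr ⟨ju, List.mem_cons_self .., hc.1, h⟩
        · exact Or.inr ⟨ju', List.mem_cons_of_mem _ hm', he', hv'⟩
    · obtain ⟨ih1, ih2, ih3⟩ := ih r
      rw [hstep, if_neg hc]
      refine ⟨ih1, ?_, ?_⟩
      · intro ju' hm he
        rcases List.mem_cons.mp hm with rfl | hm'
        · have : ¬ (k - ju'.1 > r) := fun hgt => hc ⟨he, hgt⟩
          omega
        · exact ih2 ju' hm' he
      · rcases ih3 with h | ⟨ju', hm', he', hv'⟩
        · exact Or.inl h
        · exact Or.inr ⟨ju', List.mem_cons_of_mem _ hm', he', hv'⟩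

lemma pvOuter_spec (E L : List (Int × Int)) (r : Int) :
    r ≤ pvOuterLoop E L r ∧
    (∀ kv ∈ L, ∀ ju ∈ E, ju.2 = kv.2 → kv.1 - ju.1 ≤ pvOuterLoop E L r) ∧
    (pvOuterLoop E L r = r ∨
      ∃ kv ∈ L, ∃ ju ∈ E, ju.2 = kv.2 ∧ pvOuterLoop E L r = kv.1 - ju.1) := by
  induction L generalizing r with
  | nil => simp [pvOuterLoop]
  | cons kv L ih =>
    have hstep : pvOuterLoop E (kv :: L) r = pvOuterLoop E L (pvInnerLoop E kv.1 kv.2 r) := rfl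
    obtain ⟨i1, i2, i3⟩ := pvInner_spec E kv.1 kv.2 r
    obtain ⟨o1, o2, o3⟩ := ih (pvInnerLoop E kv.1 kv.2 r)
    rw [hstep]
    refine ⟨le_trans i1 o1, ?_, ?_⟩
    · intro kv' hm ju hmE he
      rcases List.mem_cons.mp hm with rfl | hm'
      · exact le_trans (i2 ju hmE he) o1
      · exact o2 kv' hm' ju hmE he
    · rcases o3 with h | ⟨kv', hm', ju', hmE', he', hv'⟩
      · rw [h]
        rcases i3 with h2 | ⟨ju', hmE', he', hv'⟩
        · exact Or.inl h2
        · exact Or.inr ⟨kv, List.mem_cons_self .., ju', hmE', he', hv'⟩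
      · exact Or.inr ⟨kv', List.mem_cons_of_mem _ hm', ju', hmE', he', hv'⟩

-- once no remaining entry can beat result, the unbroken loop does nothing more
lemma pvInner_stop (E : List (Int × Int)) (k v r : Int)
    (h : ∀ ju ∈ E, k - ju.1 ≤ r) : pvInnerLoop E k v r = r := by
  induction E with
  | nil => rfl
  | cons ju rest ih =>
    have hstep : pvInnerLoop (ju :: rest) k v r
        = pvInnerLoop rest k v (if ju.2 = v ∧ k - ju.1 > r then k - ju.1 else r) := rfl
    have hle : k - ju.1 ≤ r := h ju (List.mem_cons_self ..)
    rw [hstep, if_neg (fun hc => by omega)]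
    exact ih fun ju' hm => h ju' (List.mem_cons_of_mem _ hm)

-- B's break only skips iterations that cannot change the result
lemma pvBInner_eq (E : List (Int × Int)) (kv : Int × Int) (r : Int)
    (hp : E.Pairwise (fun p q => p.1 < q.1)) :
    pvBInner E kv r = pvInnerLoop E kv.1 kv.2 r := by
  induction E generalizing r with
  | nil => rfl
  | cons ju rest ih =>
    obtain ⟨hhd, htl⟩ := List.pairwise_cons.mp hp
    have hstep : pvInnerLoop (ju :: rest) kv.1 kv.2 r
        = pvInnerLoop rest kv.1 kv.2
            (if ju.2 = kv.2 ∧ kv.1 - ju.1 > r then kv.1 - ju.1 else r) := rfl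
    by_cases hle : kv.1 - ju.1 ≤ r
    · rw [hstep, if_neg (fun hc => by omega)]
      rw [pvInner_stop rest kv.1 kv.2 r (fun ju' hm => by have := hhd ju' hm; omega)]
      simp [pvBInner, hle]
    · by_cases he : ju.2 = kv.2
      · rw [hstep, if_pos ⟨he, by omega⟩]
        simp only [pvBInner, if_neg hle, if_pos he]
        exact ih _ htl
      · rw [hstep, if_neg (fun hc => he hc.1)]
        simp only [pvBInner, if_neg hle, if_neg he]
        exact ih _ htl

lemma pvBOuter_eq (E L : List (Int × Int)) (r : Int)
    (hp : E.Pairwise (fun p q => p.1 < q.1)) :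
    L.foldl (fun result kv => pvBInner E kv result) r = pvOuterLoop E L r := by
  induction L generalizing r with
  | nil => rfl
  | cons kv L ih =>
    have hstep : pvOuterLoop E (kv :: L) r = pvOuterLoop E L (pvInnerLoop E kv.1 kv.2 r) := rfl
    rw [List.foldl_cons, hstep, pvBInner_eq E kv r hp]
    exact ih _

lemma pvB_good (ps : List Int) :
    pvGood ps (pvOuterLoop (PySem.List.enumerate ps 0) (PySem.List.enumerate ps 0) 0) := by
  obtain ⟨o1, o2, o3⟩ := pvOuter_spec (PySem.List.enumerate ps 0) (PySem.List.enumerate ps 0) 0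
  refine ⟨o1, ?_, ?_⟩
  · intro j k hj hk he
    have hkE : ((0 : Int) + (k : Nat), ps[k]) ∈ PySem.List.enumerate ps 0 :=
      (PySem.List.mem_enumerate_iff ps 0 _).mpr ⟨k, hk, rfl⟩
    have hjE : ((0 : Int) + (j : Nat), ps[j]) ∈ PySem.List.enumerate ps 0 :=
      (PySem.List.mem_enumerate_iff ps 0 _).mpr ⟨j, hj, rfl⟩
    have := o2 _ hkE _ hjE (by simpa using he)
    simp only [zero_add] at this
    omega
  · rcases o3 with h | ⟨kv, hm, ju, hmE, he, hv⟩
    · exact Or.inl h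
    · rw [PySem.List.mem_enumerate_iff _ _ _] at hm hmE
      obtain ⟨k, hk, rfl⟩ := hm
      obtain ⟨j, hj, rfl⟩ := hmE
      refine Or.inr ⟨j, k, hj, hk, ?_, ?_⟩
      · simpa using he
      · simp only [zero_add] at hv
        omega

-- ---- assembly ----

lemma pvA_eq_good (nums1 nums2 : List Int) :
    pvGood ([0] ++ pvExt 0 (List.zip nums1 nums2)) (widestPairOfIndices nums1 nums2) := by
  have hlk0 : ∀ v : Int, (PySem.Dict.ofList [((0 : Int), (-1 : Int))]).get? v =
      if v ∈ ([0] : List Int) then some ((pvFirst v [0] : Int) - 1) else none := by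
    intro v
    by_cases hv : v = 0
    · subst hv
      rfl
    · have h1 : v ∉ ([0] : List Int) := by simp [hv]
      rw [if_neg h1]
      have : PySem.Dict.ofList [((0 : Int), (-1 : Int))]
          = PySem.Dict.mk [((0 : Int), (-1 : Int))] := rfl
      rw [this, PySem.Dict.get?_mk_cons]
      have hb : ((0 : Int) == v) = false := by simp [Ne.symm hv]
      rw [hb]
      rfl
    
  have h := pvA_good (List.zip nums1 nums2) [0] (PySem.Dict.ofList [((0 : Int), (-1 : Int))]) 0 0
    (by simp) hlk0 le_rfl
    (by
      intro j k hj hk he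
      simp only [List.length_singleton] at hj hk
      omega)
    (Or.inl rfl)
  have hl : ((([0] : List Int).length : Int) - 1) = 0 := by simp
  rw [hl] at h
  exact h

theorem widestPairOfIndices_spec : Claim_equal_widestPairOfIndices := by
  intro nums1 nums2 _
  unfold Spec_widestPairOfIndices
  have hA := pvA_eq_good nums1 nums2
  have hB := pvB_good ([0] ++ pvExt 0 (List.zip nums1 nums2))
  have hBps : widestPairOfIndices_alt nums1 nums2
      = pvOuterLoop (PySem.List.enumerate ([0] ++ pvExt 0 (List.zip nums1 nums2)) 0)
          (PySem.List.enumerate ([0] ++ pvExt 0 (List.zip nums1 nums2)) 0) 0 := by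
    show (PySem.List.enumerate ((List.zip nums1 nums2).foldl
        (fun acc p => acc ++ [(PySem.List.pyGet? acc (-1)).getD 0 + (p.1 - p.2)]) [0]) 0).foldl _ 0 = _
    rw [pvPsBuild (List.zip nums1 nums2) [0] 0 rfl]
    exact pvBOuter_eq _ _ 0 (PySem.List.pairwise_lt_enumerate _ _)
  rw [hBps]
  exact pvGood_unique hA hB
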